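-- pv_equiv track=rewrite | github.com/rentton/learning | FormalLanguagesAndCompilers/LexicalAnalizer2.py | LexicalAnalizer
-- ===== SOURCE A (Python) =====
-- def LexicalAnalizer(L):
--     if L[0] != 'a' or L[len(L)-1] != 'c':
--         return False
--     else:
--         for i in range(1,len(L)-1):
--             if L[i] < L[i-1]:
--                 return False
--         return True
-- ===== SOURCE B (Python) =====
-- def LexicalAnalizer(L):
--     if L[0] != 'a' or L[-1] != 'c':
--         return False
--     m = L[:-1]
--     return sorted(m) == list(m)
-- ===== Notes on version B (the rewrite author's own statement) =====
-- stated objective: idiomatic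
-- what changed: Replaces the explicit index loop comparing adjacent characters with a guard plus a sortedness test on the prefix L[:-1] via sorted(m) == list(m).
import Mathlib
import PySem

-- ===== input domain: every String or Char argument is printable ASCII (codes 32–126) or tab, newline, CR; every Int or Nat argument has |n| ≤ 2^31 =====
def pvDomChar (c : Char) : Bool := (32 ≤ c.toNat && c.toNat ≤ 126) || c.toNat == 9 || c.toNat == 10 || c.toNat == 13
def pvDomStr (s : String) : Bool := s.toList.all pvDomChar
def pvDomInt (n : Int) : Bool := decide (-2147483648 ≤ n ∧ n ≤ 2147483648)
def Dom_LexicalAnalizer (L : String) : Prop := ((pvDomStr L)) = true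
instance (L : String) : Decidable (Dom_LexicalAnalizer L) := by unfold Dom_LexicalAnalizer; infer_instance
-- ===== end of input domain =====

-- B replaces A's explicit adjacent-pair index loop with a guard plus a
-- sortedness test (sorted(m) == list(m)) on the prefix L[:-1]; objective: idiomatic.


-- ===== PORT A =====
def LexicalAnalizer (L : String) : Bool :=
  let cs := L.toList
  if PySem.List.pyGetD cs 0 ' ' != 'a' || PySem.List.pyGetD cs ((cs.length : Int) - 1) ' ' != 'c' then
    false
  else
    (PySem.List.pyRange 1 ((cs.length : Int) - 1) 1).foldl
      (fun acc i =>
        acc && !(decide (PySem.List.pyGetD cs i ' ' < PySem.List.pyGetD cs (i - 1) ' ')))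
      true

-- ===== PORT B =====
def LexicalAnalizer_alt (L : String) : Bool :=
  let cs := L.toList
  if PySem.List.pyGetD cs 0 ' ' != 'a' || PySem.List.pyGetD cs (-1) ' ' != 'c' then
    false
  else
    let m := PySem.List.slice cs none (some (-1))
    PySem.List.sorted m (fun x => x) false == m

-- ===== PRECONDITION & SPEC =====
-- Pre_ excludes only the empty string, on which Python A raises IndexError (L[0]).
def Pre_LexicalAnalizer (L : String) : Prop := L ≠ ""
instance (L : String) : Decidable (Pre_LexicalAnalizer L) := by unfold Pre_LexicalAnalizer; infer_instance
def pvWitness_LexicalAnalizer : String := "abc"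

def Spec_LexicalAnalizer (L : String) (out : Bool) : Prop := out = LexicalAnalizer_alt L
instance (L : String) (out : Bool) : Decidable (Spec_LexicalAnalizer L out) := by unfold Spec_LexicalAnalizer; infer_instance

-- ===== CLAIM (what is proved, stated in full; the proofs are below) =====
def Claim_equal_LexicalAnalizer : Prop := ∀ (L : String), Dom_LexicalAnalizer L → Pre_LexicalAnalizer L → Spec_LexicalAnalizer L (LexicalAnalizer L)

-- ===== LEMMAS AND PROOFS =====

-- a fold with && over a list is List.all
theorem pv_foldl_and {α : Type} (f : α → Bool) (l : List α) (acc : Bool) :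
    l.foldl (fun acc i => acc && f i) acc = (acc && l.all f) := by
  induction l generalizing acc with
  | nil => simp
  | cons x xs ih => simp [List.foldl_cons, List.all_cons, ih, Bool.and_assoc]

-- A's loop is true iff the prefix (all but the last char) is adjacent-non-decreasing.
theorem pv_loop_iff (cs : List Char) :
    ((PySem.List.pyRange 1 ((cs.length : Int) - 1) 1).foldl
      (fun acc i =>
        acc && !(decide (PySem.List.pyGetD cs i ' ' < PySem.List.pyGetD cs (i - 1) ' ')))
      true = true)
    ↔ List.IsChain (· ≤ ·) (cs.take (cs.length - 1)) := by
  rw [pv_foldl_and, Bool.true_and, List.all_eq_true, List.isChain_iff_getElem]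
  have hlen : (cs.take (cs.length - 1)).length = cs.length - 1 := by simp
  constructor
  · intro h i hi
    have hi' : i + 1 < cs.length - 1 := by omega
    have hmem : ((i : Int) + 1) ∈ PySem.List.pyRange 1 ((cs.length : Int) - 1) 1 := by
      rw [PySem.List.mem_pyRange_one]
      constructor
      · omega
      · omega
    have hdec := h _ hmem
    simp only [Bool.not_eq_eq_eq_not, Bool.not_true, decide_eq_false_iff_not] at hdec
    have e1 : PySem.List.pyGetD cs ((i : Int) + 1) ' ' = cs[i+1]'(by omega) := by
      rw [show ((i : Int) + 1) = ((i + 1 : Nat) : Int) by omega,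
        PySem.List.pyGetD_natCast, List.getD_eq_getElem _ _ (by omega)]
    have e2 : PySem.List.pyGetD cs ((i : Int) + 1 - 1) ' ' = cs[i]'(by omega) := by
      rw [show ((i : Int) + 1 - 1) = ((i : Nat) : Int) by omega,
        PySem.List.pyGetD_natCast, List.getD_eq_getElem _ _ (by omega)]
    rw [e1, e2] at hdec
    simpa [List.getElem_take] using not_lt.mp hdec
  · intro h i hmem
    rw [PySem.List.mem_pyRange_one] at hmem
    obtain ⟨h1, h2⟩ := hmem
    obtain ⟨k, rfl⟩ : ∃ k : Nat, i = (k : Int) + 1 := ⟨(i - 1).toNat, by omega⟩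
    have hk : k + 1 < cs.length - 1 := by omega
    simp only [Bool.not_eq_eq_eq_not, Bool.not_true, decide_eq_false_iff_not]
    have e1 : PySem.List.pyGetD cs ((k : Int) + 1) ' ' = cs[k+1]'(by omega) := by
      rw [show ((k : Int) + 1) = ((k + 1 : Nat) : Int) by omega,
        PySem.List.pyGetD_natCast, List.getD_eq_getElem _ _ (by omega)]
    have e2 : PySem.List.pyGetD cs ((k : Int) + 1 - 1) ' ' = cs[k]'(by omega) := by
      rw [show ((k : Int) + 1 - 1) = ((k : Nat) : Int) by omega,
        PySem.List.pyGetD_natCast, List.getD_eq_getElem _ _ (by omega)]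
    rw [e1, e2]
    have := h k (by omega)
    simp only [List.getElem_take] at this
    exact not_lt.mpr this

-- B's sortedness test is true iff the same prefix is adjacent-non-decreasing.
theorem pv_sorted_iff (cs : List Char) :
    ((PySem.List.sorted (PySem.List.slice cs none (some (-1))) (fun x => x) false
        == PySem.List.slice cs none (some (-1))) = true)
    ↔ List.IsChain (· ≤ ·) (cs.take (cs.length - 1)) := by
  have hsl : PySem.List.slice cs none (some (-1)) = cs.take (cs.length - 1) := by
    have := PySem.List.slice_to_neg_natCast cs (k := 1) (by omega)
    simpa using this
  rw [hsl, beq_iff_eq, List.isChain_iff_pairwise]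
  constructor
  · intro h
    have hp := PySem.List.sorted_pairwise (xs := cs.take (cs.length - 1)) (key := fun x => x)
    rw [h] at hp
    exact hp
  · intro h
    exact PySem.List.sorted_eq_self_of_pairwise _ _ h

-- the two bodies agree on every list of characters
theorem pv_main (cs : List Char) :
    (if PySem.List.pyGetD cs 0 ' ' != 'a' || PySem.List.pyGetD cs ((cs.length : Int) - 1) ' ' != 'c' then
      false
    else
      (PySem.List.pyRange 1 ((cs.length : Int) - 1) 1).foldl
        (fun acc i =>
          acc && !(decide (PySem.List.pyGetD cs i ' ' < PySem.List.pyGetD cs (i - 1) ' ')))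
        true)
    = (if PySem.List.pyGetD cs 0 ' ' != 'a' || PySem.List.pyGetD cs (-1) ' ' != 'c' then
      false
    else
      PySem.List.sorted (PySem.List.slice cs none (some (-1))) (fun x => x) false
        == PySem.List.slice cs none (some (-1))) := by
  by_cases hne : cs = []
  · subst hne; rfl
  · have hlen : 1 ≤ cs.length := List.length_pos_iff.mpr hne
    have hguard : PySem.List.pyGetD cs ((cs.length : Int) - 1) ' ' = PySem.List.pyGetD cs (-1) ' ' := by
      rw [PySem.List.pyGetD_neg_one (h := hne),
        show ((cs.length : Int) - 1) = ((cs.length - 1 : Nat) : Int) by omega,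
        PySem.List.pyGetD_natCast, List.getD_eq_getElem _ _ (by omega), List.getLast_eq_getElem]
    rw [hguard]
    by_cases hg : (PySem.List.pyGetD cs 0 ' ' != 'a' || PySem.List.pyGetD cs (-1) ' ' != 'c') = true
    · rw [if_pos hg, if_pos hg]
    · rw [if_neg hg, if_neg hg, Bool.eq_iff_iff, pv_loop_iff, pv_sorted_iff]

-- ===== VERDICT (by name: the statement is the Claim_ definition above) =====
theorem LexicalAnalizer_spec : Claim_equal_LexicalAnalizer := by
  intro L _ _
  unfold Spec_LexicalAnalizer LexicalAnalizer LexicalAnalizer_alt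
  exact pv_main L.toList
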